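-- pv_equiv track=rewrite | github.com/boris-kz/CogAlg | test/procedural_operations_testing.py | lateral_comp
-- ===== SOURCE A (Python) =====
-- from collections import deque
--
-- def lateral_comp(dert_, rng, x_start=0):
--
--     new_dert_ = []
--
--     dert_buff_ = deque(maxlen=rng)
--
--     max_index = rng - 1
--
--     for x, (i, ncomp, dx, dy) in enumerate(dert_):
--
--         if len(dert_buff_) == rng:  # xd == rng
--
--             _i, _ncomp, _dx, _dy = dert_buff_[max_index]
--
--             d = i - _i      # lateral comparison
--
--             ncomp += 1      # bilateral accumulation
--             dx += d         # bilateral accumulation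
--             _ncomp += 1     # bilateral accumulation
--             _dx += d        # bilateral accumulation
--
--             new_dert_.append((_i, _ncomp, _dx, _dy))
--
--         dert_buff_.appendleft((i, ncomp, dx, dy))
--
--     while dert_buff_:
--         new_dert_.append(dert_buff_.pop())
--
--     return new_dert_
-- ===== SOURCE B (Python) =====
-- def lateral_comp(dert_, rng, x_start=0):
--     # Direct-index single pass: each element is compared with its neighbours at
--     # distance rng on both sides; no deque buffer, no flush phase.
--     n = len(dert_)
--     new_dert_ = []
--     for x, (i, ncomp, dx, dy) in enumerate(dert_):
--         if x >= rng:
--             ncomp += 1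
--             dx += i - dert_[x - rng][0]
--         if x + rng < n:
--             ncomp += 1
--             dx += dert_[x + rng][0] - i
--         new_dert_.append((i, ncomp, dx, dy))
--     return new_dert_
-- ===== Notes on version B (the rewrite author's own statement) =====
-- stated objective: simpler
-- what changed: Replaced the deque sliding buffer with its flush phase by a single direct-index pass that adds both neighbour comparisons (x-rng and x+rng) to each element as it is emitted.
import Mathlib
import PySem

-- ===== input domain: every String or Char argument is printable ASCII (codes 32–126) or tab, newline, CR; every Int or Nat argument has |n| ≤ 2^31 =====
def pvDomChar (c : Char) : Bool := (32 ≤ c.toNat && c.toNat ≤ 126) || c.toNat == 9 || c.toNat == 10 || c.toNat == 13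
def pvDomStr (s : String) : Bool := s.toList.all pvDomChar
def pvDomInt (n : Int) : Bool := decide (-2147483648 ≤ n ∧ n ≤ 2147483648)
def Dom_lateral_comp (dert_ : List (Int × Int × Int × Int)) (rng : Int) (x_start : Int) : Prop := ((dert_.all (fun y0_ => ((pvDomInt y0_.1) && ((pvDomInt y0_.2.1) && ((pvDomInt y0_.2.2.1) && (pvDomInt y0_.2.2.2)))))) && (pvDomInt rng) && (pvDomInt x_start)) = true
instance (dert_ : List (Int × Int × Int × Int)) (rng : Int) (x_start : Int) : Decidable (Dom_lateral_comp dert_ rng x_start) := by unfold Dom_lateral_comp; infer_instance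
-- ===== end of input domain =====

-- B replaces A's deque sliding buffer and flush phase by one direct-index pass
-- adding both neighbour comparisons to each element (objective: simpler).

-- ===== PORT A =====
-- the deque (appendleft, maxlen=rng) is modelled as a list with head = newest:
-- appendleft = cons followed by `take rng` (maxlen drops from the right when full);
-- dert_buff_[max_index] (max_index = rng-1) is pyGet? buff (rng-1).
def lcStep (rng : Int) (st : List (Int × Int × Int × Int) × List (Int × Int × Int × Int))
    (t : Int × Int × Int × Int) : List (Int × Int × Int × Int) × List (Int × Int × Int × Int) :=
  let (new_, buff) := st
  let (i, ncomp, dx, dy) := t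
  if buff.length = rng.toNat then
    match PySem.List.pyGet? buff (rng - 1) with
    | some (_i, _ncomp, _dx, _dy) =>
        let d := i - _i
        (new_ ++ [(_i, _ncomp + 1, _dx + d, _dy)],
         ((i, ncomp + 1, dx + d, dy) :: buff).take rng.toNat)
    | none => (new_, ((i, ncomp, dx, dy) :: buff).take rng.toNat)  -- Python raises IndexError here (only reachable with rng ≤ 0, outside Pre_)
  else (new_, ((i, ncomp, dx, dy) :: buff).take rng.toNat)

def lateral_comp (dert_ : List (Int × Int × Int × Int)) (rng : Int) (x_start : Int) :
    List (Int × Int × Int × Int) :=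
  -- the enumerate index x is never used in A's loop body, so the fold is over the list itself;
  -- the final while-pop flush appends the buffer oldest-first, i.e. buff.reverse
  let st := dert_.foldl (lcStep rng) ([], [])
  st.1 ++ st.2.reverse

-- ===== PORT B =====
def lateral_comp_alt (dert_ : List (Int × Int × Int × Int)) (rng : Int) (x_start : Int) :
    List (Int × Int × Int × Int) :=
  dert_.mapIdx fun x t =>
    let (i, ncomp, dx, dy) := t
    -- dert_[x - rng] / dert_[x + rng]: in range whenever the guard holds and rng ≥ 1
    -- (or rng = 0); .getD is a total stand-in for indexing that never raises there
    let p1 := if rng ≤ (x : Int) then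
        (ncomp + 1, dx + (i - ((PySem.List.pyGet? dert_ ((x : Int) - rng)).getD (0,0,0,0)).1))
      else (ncomp, dx)
    let p2 := if (x : Int) + rng < (dert_.length : Int) then
        (p1.1 + 1, p1.2 + (((PySem.List.pyGet? dert_ ((x : Int) + rng)).getD (0,0,0,0)).1 - i))
      else p1
    (i, p2.1, p2.2, dy)

-- ===== PRECONDITION & SPEC =====
-- A raises on rng < 0 (ValueError from deque(maxlen=rng)) and on rng = 0 with a
-- non-empty list (IndexError indexing the empty deque); those inputs are excluded.
def Pre_lateral_comp (dert_ : List (Int × Int × Int × Int)) (rng : Int) (x_start : Int) : Prop :=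
  1 ≤ rng ∨ (rng = 0 ∧ dert_ = [])
instance (dert_ : List (Int × Int × Int × Int)) (rng : Int) (x_start : Int) :
    Decidable (Pre_lateral_comp dert_ rng x_start) := by unfold Pre_lateral_comp; infer_instance
def pvWitness_lateral_comp : (List (Int × Int × Int × Int)) × Int × Int :=
  ([(3, 0, 0, 0), (1, 0, 0, 0), (5, 0, 0, 0)], 1, 0)

def Spec_lateral_comp (dert_ : List (Int × Int × Int × Int)) (rng : Int) (x_start : Int)
    (out : List (Int × Int × Int × Int)) : Prop := out = lateral_comp_alt dert_ rng x_start
instance (dert_ : List (Int × Int × Int × Int)) (rng : Int) (x_start : Int)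
    (out : List (Int × Int × Int × Int)) : Decidable (Spec_lateral_comp dert_ rng x_start out) := by
  unfold Spec_lateral_comp; infer_instance

-- ===== CLAIM =====
def Claim_equal_lateral_comp : Prop := ∀ (dert_ : List (Int × Int × Int × Int)) (rng : Int) (x_start : Int), Dom_lateral_comp dert_ rng x_start → Pre_lateral_comp dert_ rng x_start → Spec_lateral_comp dert_ rng x_start (lateral_comp dert_ rng x_start)
-- ===== LEMMAS AND PROOFS =====

-- the sliding-window model of A's loop: W is the buffer OLDEST-FIRST, |W| ≤ k
def lcRun (k : Nat) : List (Int × Int × Int × Int) → List (Int × Int × Int × Int) →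
    List (Int × Int × Int × Int)
  | W, [] => W
  | [], t :: rest => lcRun k [t] rest
  | w :: W', t :: rest =>
      if W'.length + 1 = k then
        (w.1, w.2.1 + 1, w.2.2.1 + (t.1 - w.1), w.2.2.2) ::
          lcRun k (W' ++ [(t.1, t.2.1 + 1, t.2.2.1 + (t.1 - w.1), t.2.2.2)]) rest
      else lcRun k (w :: W' ++ [t]) rest

-- the per-index closed form: element j gets its backward comparison iff h ≤ j ∧ k ≤ j
-- and its forward comparison iff j + k < n  (is = the list of i-components)
def lcF (k h : Nat) (is : List Int) (j : Nat) (t : Int × Int × Int × Int) :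
    Int × Int × Int × Int :=
  (t.1,
   t.2.1 + (if h ≤ j ∧ k ≤ j then 1 else 0) + (if j + k < is.length then 1 else 0),
   t.2.2.1 + (if h ≤ j ∧ k ≤ j then t.1 - is.getD (j - k) 0 else 0)
           + (if j + k < is.length then is.getD (j + k) 0 - t.1 else 0),
   t.2.2.2)

def lcCore (k h : Nat) (L : List (Int × Int × Int × Int)) : List (Int × Int × Int × Int) :=
  L.mapIdx (lcF k h (L.map (·.1)))

theorem pvMapIdx_congr {α β : Type} (f g : Nat → α → β) (l : List α)
    (h : ∀ j (hj : j < l.length), f j l[j] = g j l[j]) : l.mapIdx f = l.mapIdx g := by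
  apply List.ext_getElem (by simp)
  intro i h1 h2
  simp only [List.getElem_mapIdx]
  exact h i (by simpa using h1)

theorem pvMapIdx_eq_self {α : Type} (f : Nat → α → α) (l : List α)
    (h : ∀ j (hj : j < l.length), f j l[j] = l[j]) : l.mapIdx f = l := by
  apply List.ext_getElem (by simp)
  intro i h1 h2
  simp only [List.getElem_mapIdx]
  exact h i h2

-- warming up: while the window is not yet full, raising h by one changes nothing
theorem lcCore_h_succ (k h : Nat) (hk : h < k) (L : List (Int × Int × Int × Int)) :
    lcCore k h L = lcCore k (h + 1) L := by
  unfold lcCore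
  apply pvMapIdx_congr
  intro j hj
  unfold lcF
  have h9 : (h ≤ j ∧ k ≤ j) ↔ (h + 1 ≤ j ∧ k ≤ j) := by omega
  simp only [h9]

-- the key shift step: popping the full window's oldest element w against incomer t
theorem lcCore_shift (k : Nat) (hk : 1 ≤ k) (w t : Int × Int × Int × Int)
    (W' rest : List (Int × Int × Int × Int)) (hW : W'.length = k - 1) :
    lcCore k k (w :: (W' ++ t :: rest)) =
      (w.1, w.2.1 + 1, w.2.2.1 + (t.1 - w.1), w.2.2.2) ::
        lcCore k k (W' ++ (t.1, t.2.1 + 1, t.2.2.1 + (t.1 - w.1), t.2.2.2) :: rest) := by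
  have his : (w :: (W' ++ t :: rest)).map (·.1)
      = w.1 :: (W' ++ (t.1, t.2.1 + 1, t.2.2.1 + (t.1 - w.1), t.2.2.2) :: rest).map (·.1) := by
    simp
  refine List.ext_getElem ?_ ?_
  · simp only [lcCore, List.length_mapIdx, List.length_cons, List.length_append]
  intro j h1 h2
  rcases j with _ | j
  · -- j = 0 : the popped element
    simp only [lcCore, List.getElem_mapIdx, List.getElem_cons_zero]
    simp only [his]
    unfold lcF
    have hc1 : ¬ (k ≤ 0 ∧ k ≤ 0) := by omega
    have hc2 : 0 + k < (w.1 :: (W' ++ (t.1, t.2.1 + 1, t.2.2.1 + (t.1 - w.1), t.2.2.2) :: rest).map (·.1)).length := by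
      simp [hW]; omega
    rw [if_neg hc1, if_neg hc1, if_pos hc2, if_pos hc2]
    have hk0 : (w.1 :: (W' ++ (t.1, t.2.1 + 1, t.2.2.1 + (t.1 - w.1), t.2.2.2) :: rest).map (·.1)).getD (0 + k) 0 = t.1 := by
      have h9 : 0 + k = (W'.map (·.1)).length + 1 := by simp [hW]; omega
      rw [h9]
      simp [List.getD]
    rw [hk0]
    simp
  · -- j+1 : shifted positions
    have hj : j < (k - 1) + 1 + rest.length := by
      have h9 := h1; simp [lcCore, hW] at h9; omega
    simp only [lcCore, List.getElem_mapIdx, List.getElem_cons_succ]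
    simp only [his]
    have hel : ∀ m (hm : m < (k-1) + 1 + rest.length) (hne : m ≠ k - 1),
        (W' ++ t :: rest)[m]'(by simp [hW] <;> omega)
          = (W' ++ (t.1, t.2.1 + 1, t.2.2.1 + (t.1 - w.1), t.2.2.2) :: rest)[m]'(by simp [hW] <;> omega) := by
      intro m hm hne
      rcases Nat.lt_or_ge m (k-1) with h | h
      · rw [List.getElem_append_left (by omega), List.getElem_append_left (by omega)]
      · have hge : W'.length ≤ m := by omega
        rw [List.getElem_append_right hge, List.getElem_append_right hge]
        have : m - W'.length ≠ 0 := by omega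
        rcases Nat.exists_eq_succ_of_ne_zero this with ⟨p, hp⟩
        simp [hp]
    -- abstract the shared list of i-components
    obtain ⟨is2, hIS⟩ : ∃ l, (W' ++ ((t.1, t.2.1 + 1, t.2.2.1 + (t.1 - w.1), t.2.2.2) :
        Int × Int × Int × Int) :: rest).map (·.1) = l := ⟨_, rfl⟩
    simp only [hIS]
    have hlen2 : is2.length = (k - 1) + 1 + rest.length := by rw [← hIS]; simp [hW] <;> omega
    have hgetD : ∀ m, (w.1 :: is2).getD (m + 1) 0 = is2.getD m 0 := by
      intro m; simp [List.getD]
    have hlen1 : (w.1 :: is2).length = is2.length + 1 := by simp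
    unfold lcF
    by_cases hcase : j = k - 1
    · -- the incoming element t vs its updated copy
      subst hcase
      have he1 : (W' ++ t :: rest)[k-1]'(by simp [hW] <;> omega) = t := by
        rw [List.getElem_append_right (by omega)]
        simp [hW]
      have he2 : (W' ++ (t.1, t.2.1 + 1, t.2.2.1 + (t.1 - w.1), t.2.2.2) :: rest)[k-1]'(by simp [hW] <;> omega)
          = (t.1, t.2.1 + 1, t.2.2.1 + (t.1 - w.1), t.2.2.2) := by
        rw [List.getElem_append_right (by omega)]
        simp [hW]
      rw [he1, he2]
      have hc1 : (k ≤ k - 1 + 1 ∧ k ≤ k - 1 + 1) := by omega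
      have hc2 : ¬ (k ≤ k - 1 ∧ k ≤ k - 1) := by omega
      rw [if_pos hc1, if_pos hc1, if_neg hc2, if_neg hc2]
      have hd0 : (w.1 :: is2).getD (k - 1 + 1 - k) 0 = w.1 := by
        have h9 : k - 1 + 1 - k = 0 := by omega
        simp [h9]
      have hidx : k - 1 + 1 + k = (k - 1 + k) + 1 := by omega
      simp only [hd0, hidx, hgetD]
      have hcf : ((k - 1 + k) + 1 < (w.1 :: is2).length) ↔ (k - 1 + k < is2.length) := by
        rw [hlen1]; omega
      simp only [hcf]
      by_cases hf : k - 1 + k < is2.length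
      · simp only [if_pos hf, Prod.mk.injEq]
        refine ⟨?_, ?_, ?_, ?_⟩ <;> first | rfl | trivial | ring
      · simp only [if_neg hf, Prod.mk.injEq]
        refine ⟨?_, ?_, ?_, ?_⟩ <;> first | rfl | trivial | ring
    · -- positions that merely shift by one
      rw [hel j hj hcase]
      have hg1 : (k ≤ j + 1 ∧ k ≤ j + 1) ↔ (k ≤ j ∧ k ≤ j) := by omega
      simp only [hg1]
      have hfc : (j + 1 + k < (w.1 :: is2).length) ↔ (j + k < is2.length) := by
        rw [hlen1]; omega
      simp only [hfc]
      by_cases hb : k ≤ j ∧ k ≤ j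
      · have hsub : j + 1 - k = (j - k) + 1 := by omega
        have hsh : j + 1 + k = (j + k) + 1 := by omega
        simp only [if_pos hb, hsub, hsh, hgetD]
      · simp only [if_neg hb]
        by_cases hf : j + k < is2.length
        · have hsh : j + 1 + k = (j + k) + 1 := by omega
          simp only [if_pos hf, hsh, hgetD]
        · simp only [if_neg hf]

theorem lcRun_spec (k : Nat) (hk : 1 ≤ k) :
    ∀ rest W, W.length ≤ k → lcRun k W rest = lcCore k W.length (W ++ rest) := by
  intro rest
  induction rest with
  | nil =>
    intro W hW
    simp only [lcRun, List.append_nil]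
    symm
    apply pvMapIdx_eq_self
    intro j hj
    unfold lcF
    have h1 : ¬ (W.length ≤ j ∧ k ≤ j) := by omega
    have h2 : ¬ (j + k < W.length) := by omega
    simp [h1, h2]
  | cons t rest ih =>
    intro W hW
    rcases W with _ | ⟨w, W'⟩
    · -- empty window: push
      simp only [lcRun, List.length_nil, List.nil_append]
      rw [ih [t] (by simpa using hk)]
      simpa using (lcCore_h_succ k 0 hk (t :: rest)).symm
    · by_cases hfull : W'.length + 1 = k
      · -- full window: pop w, push updated t
        simp only [lcRun, if_pos hfull]
        rw [ih (W' ++ [(t.1, t.2.1 + 1, t.2.2.1 + (t.1 - w.1), t.2.2.2)]) (by simp; omega)]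
        have hlen : (W' ++ [(t.1, t.2.1 + 1, t.2.2.1 + (t.1 - w.1), t.2.2.2)]).length = k := by
          simp; omega
        rw [hlen]
        have hlc : (w :: W').length = k := by simp; omega
        rw [hlc]
        have hW' : W'.length = k - 1 := by omega
        have hshift := lcCore_shift k hk w t W' rest hW'
        simp only [List.cons_append, List.append_assoc, List.singleton_append,
          List.nil_append] at hshift ⊢
        rw [hshift]
      · -- growing window: append
        simp only [lcRun, if_neg hfull]
        rw [ih (w :: W' ++ [t]) (by simp at hW ⊢; omega)]
        have h1 : (w :: W' ++ [t]).length = (w :: W').length + 1 := by simp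
        rw [h1]
        have h2 : (w :: W').length < k := by simp at hW ⊢; omega
        simp only [List.cons_append, List.append_assoc, List.singleton_append]
        exact (lcCore_h_succ k _ h2 _).symm

theorem foldl_lcRun (rng : Int) (hr : 1 ≤ rng) :
    ∀ (rest new W : List (Int × Int × Int × Int)), W.length ≤ rng.toNat →
      (rest.foldl (lcStep rng) (new, W.reverse)).1 ++
        (rest.foldl (lcStep rng) (new, W.reverse)).2.reverse =
      new ++ lcRun rng.toNat W rest := by
  intro rest
  induction rest with
  | nil => intro new W h; simp [lcRun]
  | cons t rest ih =>
    intro new W hW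
    rw [List.foldl_cons]
    obtain ⟨ti, tn, tdx, tdy⟩ := t
    rcases W with _ | ⟨⟨wi, wn, wdx, wdy⟩, W'⟩
    · -- empty buffer: since rng ≥ 1 the if-branch is not taken
      have hne : (0 : Nat) ≠ rng.toNat := by omega
      simp only [lcStep, List.reverse_nil, List.length_nil, if_neg hne]
      have htake : ([((ti : Int), tn, tdx, tdy)]).take rng.toNat = [(ti, tn, tdx, tdy)] := by
        apply List.take_of_length_le; simp; omega
      rw [show (((ti, tn, tdx, tdy) : Int × Int × Int × Int) :: ([] : List (Int × Int × Int × Int))).take rng.toNat = [(ti, tn, tdx, tdy)] from htake]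
      have := ih new [(ti, tn, tdx, tdy)] (by simp; omega)
      simp only [List.reverse_cons, List.reverse_nil, List.nil_append] at this
      rw [this]
      simp [lcRun]
    · by_cases hfull : ((⟨wi, wn, wdx, wdy⟩ : Int × Int × Int × Int) :: W').length = rng.toNat
      · -- full buffer
        have hWl : W'.length = rng.toNat - 1 := by simp at hfull; omega
        have hrev : ((((wi, wn, wdx, wdy) : Int × Int × Int × Int) :: W')).reverse
            = W'.reverse ++ [(wi, wn, wdx, wdy)] := by simp
        have hidx : PySem.List.pyGet? (W'.reverse ++ [((wi, wn, wdx, wdy) : Int × Int × Int × Int)]) (rng - 1)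
            = some (wi, wn, wdx, wdy) := by
          have h9 : rng - 1 = ((W'.reverse.length : Nat) : Int) := by
            simp [hWl]; omega
          rw [h9]
          exact PySem.List.pyGet?_append_length _ _ _
        have hlenrev : (W'.reverse ++ [((wi, wn, wdx, wdy) : Int × Int × Int × Int)]).length = rng.toNat := by
          simp at hfull ⊢; omega
        have htake : (((ti, tn + 1, tdx + (ti - wi), tdy) : Int × Int × Int × Int) ::
              (W'.reverse ++ [(wi, wn, wdx, wdy)])).take rng.toNat
            = (W' ++ [((ti, tn + 1, tdx + (ti - wi), tdy) : Int × Int × Int × Int)]).reverse := by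
          have h9 : rng.toNat = W'.length + 1 := by omega
          rw [h9, List.take_succ_cons]
          have : (W'.reverse ++ [((wi, wn, wdx, wdy) : Int × Int × Int × Int)]).take W'.length
              = W'.reverse := by
            have : W'.length = W'.reverse.length := by simp
            rw [this, List.take_left]
          rw [this]; simp
        simp only [lcStep, hrev, hlenrev, if_true, hidx]
        rw [htake]
        have := ih (new ++ [(wi, wn + 1, wdx + (ti - wi), wdy)])
          (W' ++ [(ti, tn + 1, tdx + (ti - wi), tdy)]) (by simp; omega)
        rw [this]
        simp only [lcRun]
        have hg : W'.length + 1 = rng.toNat := by simp at hfull; omega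
        rw [if_pos hg]
        simp
      · -- not yet full
        have hlt : ((⟨wi, wn, wdx, wdy⟩ : Int × Int × Int × Int) :: W').length < rng.toNat := by
          omega
        have hlen : ((((wi, wn, wdx, wdy) : Int × Int × Int × Int) :: W')).reverse.length
            = ((⟨wi, wn, wdx, wdy⟩ : Int × Int × Int × Int) :: W').length := by simp
        have htake : (((ti, tn, tdx, tdy) : Int × Int × Int × Int) ::
              ((((wi, wn, wdx, wdy) : Int × Int × Int × Int) :: W')).reverse).take rng.toNat
            = ((((wi, wn, wdx, wdy) : Int × Int × Int × Int) :: W') ++ [(ti, tn, tdx, tdy)]).reverse := by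
          rw [List.take_of_length_le (by simp at hlt ⊢; omega)]
          simp
        simp only [lcStep, hlen, if_neg (by omega : ¬ ((((wi, wn, wdx, wdy) : Int × Int × Int × Int) :: W').length = rng.toNat))]
        rw [htake]
        have := ih new ((((wi, wn, wdx, wdy) : Int × Int × Int × Int) :: W') ++ [(ti, tn, tdx, tdy)]) (by simp at hlt ⊢; omega)
        rw [this]
        simp only [lcRun]
        have hg : ¬ (W'.length + 1 = rng.toNat) := by simp at hfull; omega
        rw [if_neg hg]

theorem alt_core (dert_ : List (Int × Int × Int × Int)) (rng : Int) (x_start : Int)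
    (hr : 1 ≤ rng) : lateral_comp_alt dert_ rng x_start = lcCore rng.toNat 0 dert_ := by
  unfold lateral_comp_alt lcCore
  apply pvMapIdx_congr
  intro j hj
  have hforward : ∀ (h : j + rng.toNat < dert_.length),
      (PySem.List.pyGet? dert_ ((j : Int) + rng)).getD (0, 0, 0, 0) = dert_[j + rng.toNat]'h := by
    intro h
    have h9 : (j : Int) + rng = ((j + rng.toNat : Nat) : Int) := by omega
    rw [h9, PySem.List.pyGet?_natCast, List.getElem?_eq_getElem h]
    rfl
  have hback : ∀ (h : rng.toNat ≤ j),
      (PySem.List.pyGet? dert_ ((j : Int) - rng)).getD (0, 0, 0, 0)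
        = dert_[j - rng.toNat]'(by omega) := by
    intro h
    have h9 : (j : Int) - rng = ((j - rng.toNat : Nat) : Int) := by omega
    rw [h9, PySem.List.pyGet?_natCast, List.getElem?_eq_getElem (by omega : j - rng.toNat < dert_.length)]
    rfl
  have hgetDb : ∀ (h : rng.toNat ≤ j),
      (dert_.map (·.1)).getD (j - rng.toNat) 0 = (dert_[j - rng.toNat]'(by omega)).1 := by
    intro h
    rw [List.getD_eq_getElem _ _ (by simp; omega), List.getElem_map]
  have hgetDf : ∀ (h : j + rng.toNat < dert_.length),
      (dert_.map (·.1)).getD (j + rng.toNat) 0 = (dert_[j + rng.toNat]'h).1 := by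
    intro h
    rw [List.getD_eq_getElem _ _ (by simp; omega), List.getElem_map]
  unfold lcF
  by_cases hb : rng.toNat ≤ j
  · have hb' : rng ≤ (j : Int) := by omega
    by_cases hf : j + rng.toNat < dert_.length
    · have hf' : (j : Int) + rng < (dert_.length : Int) := by omega
      simp only [if_pos hb', if_pos hf', if_pos (show (0 ≤ j ∧ rng.toNat ≤ j) from ⟨Nat.zero_le j, hb⟩),
        if_pos (show j + rng.toNat < (dert_.map (·.1)).length by simp; omega),
        hback hb, hforward hf, hgetDb hb, hgetDf hf]
      simp [List.get_eq_getElem]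
    · have hf' : ¬ ((j : Int) + rng < (dert_.length : Int)) := by omega
      simp only [if_pos hb', if_neg hf', if_pos (show (0 ≤ j ∧ rng.toNat ≤ j) from ⟨Nat.zero_le j, hb⟩),
        if_neg (show ¬ (j + rng.toNat < (dert_.map (·.1)).length) by simp; omega),
        hback hb, hgetDb hb]
      simp [List.get_eq_getElem]
  · have hb' : ¬ (rng ≤ (j : Int)) := by omega
    by_cases hf : j + rng.toNat < dert_.length
    · have hf' : (j : Int) + rng < (dert_.length : Int) := by omega
      simp only [if_neg hb', if_pos hf', if_neg (show ¬ (0 ≤ j ∧ rng.toNat ≤ j) by omega),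
        if_pos (show j + rng.toNat < (dert_.map (·.1)).length by simp; omega),
        hforward hf, hgetDf hf]
      simp [List.get_eq_getElem]
    · have hf' : ¬ ((j : Int) + rng < (dert_.length : Int)) := by omega
      simp only [if_neg hb', if_neg hf', if_neg (show ¬ (0 ≤ j ∧ rng.toNat ≤ j) by omega),
        if_neg (show ¬ (j + rng.toNat < (dert_.map (·.1)).length) by simp; omega)]
      simp [List.get_eq_getElem]

-- ===== VERDICT =====
theorem lateral_comp_spec : Claim_equal_lateral_comp := by
  intro dert_ rng x_start _ hpre
  unfold Spec_lateral_comp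
  rcases hpre with hr | ⟨h0, he⟩
  · have h1 := foldl_lcRun rng hr dert_ [] [] (by simp)
    have h2 := lcRun_spec rng.toNat (by omega) dert_ [] (by simp)
    simp only [List.reverse_nil] at h1
    simp only [lateral_comp, h1, List.nil_append, List.length_nil] at *
    rw [h2, ← alt_core dert_ rng x_start hr]
  · subst h0 he; rfl
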